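-- pv_equiv track=rewrite | github.com/Tiz20lion/tiz-lead-scraper | app/clients/apify_client.py | _is_valid_apollo_url
-- ===== SOURCE A (Python) =====
-- def _is_valid_apollo_url(url: str) -> bool:
--     """Check if a URL is a valid Apollo.io search URL"""
--     if not url or not isinstance(url, str):
--         return False
--
--     # Check if it's an Apollo.io URL
--     apollo_domains = [
--         "apollo.io",
--         "app.apollo.io",
--         "www.apollo.io"
--     ]
--
--     # Basic URL validation
--     if not any(domain in url.lower() for domain in apollo_domains):
--         return False
--
--     # Check for common Apollo search patterns
--     valid_patterns = [
--         "/#/people",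
--         "/people",
--         "finderViewId=",
--         "/search",
--         "/contacts"
--     ]
--
--     # If it contains Apollo domain, it's likely valid
--     # More specific validation can be added based on Apollo's URL structure
--     return any(pattern in url for pattern in valid_patterns) or "apollo.io" in url.lower()
-- ===== SOURCE B (Python) =====
-- def _is_valid_apollo_url(url: str) -> bool:
--     """Check if a URL is a valid Apollo.io search URL"""
--     return isinstance(url, str) and "apollo.io" in url.lower()
-- ===== Notes on version B (the rewrite author's own statement) =====
-- stated objective: simpler
-- what changed: Both list scans and the empty-string guard collapse into a single substring test: every apollo_domains entry contains 'apollo.io' and the final 'or "apollo.io" in url.lower()' makes the pattern scan irrelevant, so B is one expression with no loops.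
import Mathlib
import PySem

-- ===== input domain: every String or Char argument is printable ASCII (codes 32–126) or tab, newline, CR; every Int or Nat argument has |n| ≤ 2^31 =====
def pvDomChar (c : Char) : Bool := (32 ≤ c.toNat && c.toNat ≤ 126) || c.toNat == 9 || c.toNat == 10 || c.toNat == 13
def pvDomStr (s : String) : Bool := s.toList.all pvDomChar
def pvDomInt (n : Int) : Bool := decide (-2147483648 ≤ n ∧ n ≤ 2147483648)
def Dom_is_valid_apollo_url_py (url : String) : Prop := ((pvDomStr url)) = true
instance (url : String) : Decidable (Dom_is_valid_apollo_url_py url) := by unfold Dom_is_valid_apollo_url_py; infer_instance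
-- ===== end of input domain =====

-- B drops both list scans: every apollo_domains entry contains "apollo.io" and the trailing
-- `or "apollo.io" in url.lower()` subsumes the pattern scan, so one substring test suffices.

-- ===== PORT A =====
def is_valid_apollo_url_py (url : String) : Bool :=
  if url == "" then false
  else
    let apollo_domains : List String := ["apollo.io", "app.apollo.io", "www.apollo.io"]
    if !(apollo_domains.any (fun d => PySem.Str.isIn d (PySem.Str.lower url))) then false
    else
      let valid_patterns : List String := ["/#/people", "/people", "finderViewId=", "/search", "/contacts"]
      (valid_patterns.any (fun p => PySem.Str.isIn p url))
        || PySem.Str.isIn "apollo.io" (PySem.Str.lower url)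

-- ===== PORT B =====
def is_valid_apollo_url_py_alt (url : String) : Bool :=
  PySem.Str.isIn "apollo.io" (PySem.Str.lower url)

-- ===== PRECONDITION & SPEC =====
def Spec_is_valid_apollo_url_py (url : String) (out : Bool) : Prop := out = is_valid_apollo_url_py_alt url
instance (url : String) (out : Bool) : Decidable (Spec_is_valid_apollo_url_py url out) := by unfold Spec_is_valid_apollo_url_py; infer_instance

-- ===== CLAIM (what is proved, stated in full; the proofs are below) =====
def Claim_equal_is_valid_apollo_url_py : Prop := ∀ (url : String), Dom_is_valid_apollo_url_py url → Spec_is_valid_apollo_url_py url (is_valid_apollo_url_py url)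

-- ===== LEMMAS AND PROOFS =====

-- "apollo.io" is a substring of each longer domain, so any of the three domain hits implies the short one.
theorem isIn_apollo_of_longer (pre : List Char) (s : List Char)
    (h : PySem.Chars.isIn (pre ++ "apollo.io".toList) s = true) :
    PySem.Chars.isIn ("apollo.io".toList) s = true := by
  rw [PySem.Chars.isIn_iff_infix] at h ⊢
  exact List.IsInfix.trans ⟨pre, [], by simp⟩ h

-- ===== VERDICT =====
theorem is_valid_apollo_url_py_spec : Claim_equal_is_valid_apollo_url_py := by
  intro url _
  unfold Spec_is_valid_apollo_url_py is_valid_apollo_url_py is_valid_apollo_url_py_alt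
  by_cases hk : PySem.Chars.isIn "apollo.io".toList (PySem.Chars.lower url.toList) = true
  · -- the short-domain hit makes the domain scan succeed and the final `or` true
    have hne : ¬ (url == "") = true := by
      intro he
      have : url = "" := by simpa using he
      subst this
      rw [PySem.Chars.isIn_iff_infix] at hk
      exact absurd (List.eq_nil_of_infix_nil hk) (by decide)
    simp only [List.any, Bool.or_false] at *
    simp [hne]
    simp at hk
    simp [hk]
  · -- no "apollo.io" anywhere: all three domains fail, A returns false
    have hk' : PySem.Chars.isIn "apollo.io".toList (PySem.Chars.lower url.toList) = false := by
      simpa using hk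
    have h2 : PySem.Chars.isIn ("app.apollo.io".toList) (PySem.Chars.lower url.toList) = false := by
      by_contra h
      exact hk (isIn_apollo_of_longer "app.".toList _ (by simpa using h))
    have h3 : PySem.Chars.isIn ("www.apollo.io".toList) (PySem.Chars.lower url.toList) = false := by
      by_contra h
      exact hk (isIn_apollo_of_longer "www.".toList _ (by simpa using h))
    simp at hk' h2 h3
    simp [hk', h2, h3]
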